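-- pv_equiv track=rewrite | github.com/zayzyyazy/job-pipeline | services/job_discovery.py | _score_url_candidates
-- ===== SOURCE A (Python) =====
-- from typing import Any, Dict, List, Optional, Sequence, Tuple
--
-- PREFERRED_DOMAIN_PARTS = (
--     "greenhouse.io",
--     "lever.co",
--     "smartrecruiters.com",
--     "workable.com",
--     "personio.",
--     "ashbyhq.com",
--     "ashbyjobs.com",
--     "myworkdayjobs.com",
-- )
--
-- AVOID_ALWAYS_SUBSTRINGS = (
--     "facebook.com",
--     "instagram.com",
--     "twitter.com",
--     "tiktok.com",
--     "linkedin.com/",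
--     "indeed.",
--     "glassdoor.",
--     "ziprecruiter",
--     "simplyhired",
-- )
--
-- def _score_url_candidates(urls: Sequence[str]) -> List[Tuple[int, str]]:
--     scored_loc: List[Tuple[int, str]] = []
--     for u in urls:
--         low = u.lower()
--         if any(av in low for av in AVOID_ALWAYS_SUBSTRINGS):
--             continue
--         score = 35
--         for frag in PREFERRED_DOMAIN_PARTS:
--             if frag in low:
--                 score += 115
--                 break
--         if any(x in low for x in ("/jobs", "/job/", "/job?", "/career", "/careers", "/karriere", "/stellen")):
--             score += 35
--         if score <= 60:
--             continue
--         scored_loc.append((score, u))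
--     scored_loc.sort(reverse=True)
--     uniq: List[str] = []
--     ordered: List[Tuple[int, str]] = []
--     for s, u in scored_loc:
--         if u not in uniq:
--             uniq.append(u)
--             ordered.append((s, u))
--     return ordered[:12]
-- ===== SOURCE B (Python) =====
-- from typing import List, Sequence, Tuple
--
-- PREFERRED_DOMAIN_PARTS = (
--     "greenhouse.io",
--     "lever.co",
--     "smartrecruiters.com",
--     "workable.com",
--     "personio.",
--     "ashbyhq.com",
--     "ashbyjobs.com",
--     "myworkdayjobs.com",
-- )
--
-- AVOID_ALWAYS_SUBSTRINGS = (
--     "facebook.com",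
--     "instagram.com",
--     "twitter.com",
--     "tiktok.com",
--     "linkedin.com/",
--     "indeed.",
--     "glassdoor.",
--     "ziprecruiter",
--     "simplyhired",
-- )
--
-- PATH_FRAGS = ("/jobs", "/job/", "/job?", "/career", "/careers", "/karriere", "/stellen")
--
--
-- def _score_url_candidates(urls: Sequence[str]) -> List[Tuple[int, str]]:
--     # Only three scores are reachable (185 = preferred+path, 150 = preferred, 70 = path),
--     # so bucket the URLs by category instead of sorting scored tuples.
--     top: set = set()
--     mid: set = set()
--     path_only: set = set()
--     for u in urls:
--         low = u.lower()
--         if any(av in low for av in AVOID_ALWAYS_SUBSTRINGS):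
--             continue
--         pref = any(frag in low for frag in PREFERRED_DOMAIN_PARTS)
--         path = any(x in low for x in PATH_FRAGS)
--         if pref and path:
--             top.add(u)
--         elif pref:
--             mid.add(u)
--         elif path:
--             path_only.add(u)
--     out: List[Tuple[int, str]] = []
--     for score, bucket in ((185, top), (150, mid), (70, path_only)):
--         for u in sorted(bucket, reverse=True):
--             out.append((score, u))
--     return out[:12]
-- ===== Notes on version B (the rewrite author's own statement) =====
-- stated objective: alternative
-- what changed: B exploits that only three scores are reachable (185 preferred+path, 150 preferred, 70 path): one pass buckets URLs into three category sets (deduplicating on insert), then the buckets are emitted in score order with each bucket's URLs sorted descending and the first 12 kept - no scored-tuple sort and no post-sort dedup scan.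
import Mathlib
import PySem

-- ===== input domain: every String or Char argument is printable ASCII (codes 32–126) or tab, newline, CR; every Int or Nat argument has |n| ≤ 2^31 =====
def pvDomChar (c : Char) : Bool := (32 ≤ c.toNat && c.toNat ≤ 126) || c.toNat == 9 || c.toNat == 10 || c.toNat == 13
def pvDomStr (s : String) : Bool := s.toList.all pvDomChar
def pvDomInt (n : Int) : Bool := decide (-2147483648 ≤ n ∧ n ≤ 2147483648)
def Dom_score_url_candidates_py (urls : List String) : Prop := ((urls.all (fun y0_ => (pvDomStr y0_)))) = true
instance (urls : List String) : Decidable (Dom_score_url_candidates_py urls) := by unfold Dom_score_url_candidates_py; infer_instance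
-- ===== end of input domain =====

-- B exploits that only three scores are reachable (185/150/70): it buckets URLs into three
-- category sets in one pass and emits the buckets in score order, each sorted descending —
-- no scored-tuple sort and no post-sort dedup scan.

-- ===== PORT A =====
def pvAvoid : List String := ["facebook.com","instagram.com","twitter.com","tiktok.com","linkedin.com/","indeed.","glassdoor.","ziprecruiter","simplyhired"]
def pvPreferred : List String := ["greenhouse.io","lever.co","smartrecruiters.com","workable.com","personio.","ashbyhq.com","ashbyjobs.com","myworkdayjobs.com"]
def pvPathFrags : List String := ["/jobs","/job/","/job?","/career","/careers","/karriere","/stellen"]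

def score_url_candidates_py (urls : List String) : List (Int × String) :=
  let scoredLoc := urls.foldl (fun acc u =>
    let low := PySem.Str.lower u
    if pvAvoid.any (fun av => PySem.Str.isIn av low) then acc
    else
      let score : Int := 35
      let score := if pvPreferred.any (fun frag => PySem.Str.isIn frag low) then score + 115 else score
      let score := if pvPathFrags.any (fun x => PySem.Str.isIn x low) then score + 35 else score
      if score ≤ 60 then acc else acc ++ [(score, u)]) []
  let sortedLoc := PySem.List.sorted scoredLoc (fun p => toLex p) true
  let st := sortedLoc.foldl (fun (st : List String × List (Int × String)) su =>
    if su.2 ∈ st.1 then st else (st.1 ++ [su.2], st.2 ++ [su])) ([], [])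
  st.2.take 12

-- ===== PORT B =====
def score_url_candidates_py_alt (urls : List String) : List (Int × String) :=
  let st := urls.foldl (fun (st : List String × List String × List String) u =>
    let low := PySem.Str.lower u
    if pvAvoid.any (fun av => PySem.Str.isIn av low) then st
    else
      let pref := pvPreferred.any (fun frag => PySem.Str.isIn frag low)
      let path := pvPathFrags.any (fun x => PySem.Str.isIn x low)
      if pref && path then (PySem.Set.add st.1 u, st.2.1, st.2.2)
      else if pref then (st.1, PySem.Set.add st.2.1 u, st.2.2)
      else if path then (st.1, st.2.1, PySem.Set.add st.2.2 u)
      else st) ([], [], [])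
  let out := ((PySem.List.sorted st.1 (fun x => x) true).map (fun u => ((185 : Int), u)))
          ++ ((PySem.List.sorted st.2.1 (fun x => x) true).map (fun u => ((150 : Int), u)))
          ++ ((PySem.List.sorted st.2.2 (fun x => x) true).map (fun u => ((70 : Int), u)))
  out.take 12

-- ===== PRECONDITION & SPEC =====
def Spec_score_url_candidates_py (urls : List String) (out : List (Int × String)) : Prop := out = score_url_candidates_py_alt urls
instance (urls : List String) (out : List (Int × String)) : Decidable (Spec_score_url_candidates_py urls out) := by unfold Spec_score_url_candidates_py; infer_instance

-- ===== CLAIM (what is proved, stated in full; the proofs are below) =====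
def Claim_equal_score_url_candidates_py : Prop := ∀ (urls : List String), Dom_score_url_candidates_py urls → Spec_score_url_candidates_py urls (score_url_candidates_py urls)

-- ===== LEMMAS AND PROOFS =====

-- B's scoring categories, as predicates on the URL
def pvAvoided (u : String) : Bool := pvAvoid.any (fun av => PySem.Str.isIn av (PySem.Str.lower u))
def pvPref (u : String) : Bool := pvPreferred.any (fun frag => PySem.Str.isIn frag (PySem.Str.lower u))
def pvPath (u : String) : Bool := pvPathFrags.any (fun x => PySem.Str.isIn x (PySem.Str.lower u))

-- A's per-URL score as an Option (none = filtered out)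
def pvScore (u : String) : Option Int :=
  if pvAvoided u then none
  else
    let score : Int := 35
    let score := if pvPref u then score + 115 else score
    let score := if pvPath u then score + 35 else score
    if score ≤ 60 then none else some score

theorem pvScore_eq (u : String) : pvScore u =
    if pvAvoided u then none
    else if pvPref u then (if pvPath u then some 185 else some 150)
    else (if pvPath u then some 70 else none) := by
  simp only [pvScore]
  split_ifs <;> first | rfl | omega

-- the filtered (url, score) pairs, in input order, with duplicates
def pvL (urls : List String) : List (String × Int) :=
  urls.filterMap (fun u => (pvScore u).map (fun s => (u, s)))

def pvSwap (kv : String × Int) : Int × String := (kv.2, kv.1)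

theorem pvL_sound : ∀ {urls : List String} {kv : String × Int}, kv ∈ pvL urls → pvScore kv.1 = some kv.2 := by
  intro urls kv h
  simp only [pvL, List.mem_filterMap, Option.map_eq_some_iff] at h
  obtain ⟨u, _, s, hs, rfl⟩ := h
  simpa using hs

-- A's accumulation loop builds exactly (pvL urls).map pvSwap
theorem pvA_fold (urls : List String) (acc : List (Int × String)) :
    urls.foldl (fun acc u =>
      let low := PySem.Str.lower u
      if pvAvoid.any (fun av => PySem.Str.isIn av low) then acc
      else
        let score : Int := 35
        let score := if pvPreferred.any (fun frag => PySem.Str.isIn frag low) then score + 115 else score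
        let score := if pvPathFrags.any (fun x => PySem.Str.isIn x low) then score + 35 else score
        if score ≤ 60 then acc else acc ++ [(score, u)]) acc
    = acc ++ (pvL urls).map pvSwap := by
  induction urls generalizing acc with
  | nil => simp [pvL]
  | cons u urls ih =>
      rw [List.foldl_cons, ih]
      have hbody : (let low := PySem.Str.lower u
          if pvAvoid.any (fun av => PySem.Str.isIn av low) then acc
          else
            let score : Int := 35
            let score := if pvPreferred.any (fun frag => PySem.Str.isIn frag low) then score + 115 else score
            let score := if pvPathFrags.any (fun x => PySem.Str.isIn x low) then score + 35 else score
            if score ≤ 60 then acc else acc ++ [(score, u)])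
          = acc ++ ((pvScore u).map (fun s => (s, u))).toList := by
        simp only [pvScore, pvAvoided, pvPref, pvPath]
        split_ifs <;> simp
      rw [hbody]
      cases h : pvScore u <;> simp [pvL, h, pvSwap]

-- A's dedup loop is Set.update on the tuple list (tuples are determined by their URL)
theorem pv_dedup_fold (S : List (Int × String)) :
    ∀ (os : List (Int × String)), (∀ p ∈ S, pvScore p.2 = some p.1) →
    (∀ p ∈ os, pvScore p.2 = some p.1) →
    S.foldl (fun (st : List String × List (Int × String)) su =>
      if su.2 ∈ st.1 then st else (st.1 ++ [su.2], st.2 ++ [su])) (os.map Prod.snd, os)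
    = ((PySem.Set.update os S).map Prod.snd, PySem.Set.update os S) := by
  induction S with
  | nil => intro os _ _; simp [PySem.Set.update]
  | cons p S ih =>
      intro os hS hos
      have hp : pvScore p.2 = some p.1 := hS p (by simp)
      have hadd : PySem.Set.add os p = if p.2 ∈ os.map Prod.snd then os else os ++ [p] := by
        simp only [PySem.Set.add, PySem.Set.contains, List.contains_eq_mem]
        by_cases hmem : p.2 ∈ os.map Prod.snd
        · obtain ⟨q, hq, hq2⟩ := List.mem_map.1 hmem
          have : q = p := by
            have := hos q hq
            rw [hq2, hp] at this
            cases q; cases p; simp_all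
          simp [hmem, this ▸ hq]
        · have : p ∉ os := fun h => hmem (List.mem_map_of_mem h)
          simp [hmem, this]
      have step : PySem.Set.update os (p :: S) = PySem.Set.update (PySem.Set.add os p) S := rfl
      rw [List.foldl_cons]
      by_cases hmem : p.2 ∈ os.map Prod.snd
      · rw [if_pos hmem, step]
        have : PySem.Set.add os p = os := by rw [hadd, if_pos hmem]
        rw [this]
        exact ih os (fun q hq => hS q (by simp [hq])) hos
      · rw [if_neg hmem, step]
        have : PySem.Set.add os p = os ++ [p] := by rw [hadd, if_neg hmem]
        rw [this]
        have hos' : ∀ q ∈ os ++ [p], pvScore q.2 = some q.1 := by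
          intro q hq
          rcases List.mem_append.1 hq with h | h
          · exact hos q h
          · simp only [List.mem_singleton] at h; subst h; exact hp
        have := ih (os ++ [p]) (fun q hq => hS q (by simp [hq])) hos'
        simpa using this

-- Set.update is a sublist of os ++ xs
theorem pv_update_sublist {α : Type} [BEq α] (xs : List α) :
    ∀ os : List α, (PySem.Set.update os xs).Sublist (os ++ xs) := by
  induction xs with
  | nil => intro os; simp [PySem.Set.update]
  | cons x xs ih =>
      intro os
      have step : PySem.Set.update os (x :: xs) = PySem.Set.update (PySem.Set.add os x) xs := rfl
      rw [step]
      have h1 := ih (PySem.Set.add os x)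
      apply h1.trans
      simp only [PySem.Set.add]
      split
      · exact (List.append_sublist_append_left os).2 (List.sublist_cons_self x xs)
      · simp [List.append_assoc]

theorem pv_ofList_sublist {α : Type} [BEq α] (xs : List α) :
    (PySem.Set.ofList xs).Sublist xs := by
  simpa using pv_update_sublist xs []

-- dedup-after-sort equals sort-after-dedup
theorem pv_central (M : List (Int × String)) :
    PySem.Set.ofList (PySem.List.sorted M (fun p => toLex p) true)
      = PySem.List.sorted (PySem.Set.ofList M) (fun p => toLex p) true := by
  set S := PySem.List.sorted M (fun p => toLex p) true with hS
  set R := PySem.Set.ofList S with hR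
  have hndR : R.Nodup := PySem.Set.nodup_ofList S
  have hsub : R.Sublist S := pv_ofList_sublist S
  have hge : List.Pairwise (fun a b : Int × String => (toLex b : Int ×ₗ String) ≤ toLex a) S :=
    PySem.List.sorted_pairwise_rev M (fun p => toLex p)
  have hgt : List.Pairwise (fun a b : Int × String => (toLex b : Int ×ₗ String) < toLex a) R := by
    have h1 := List.Pairwise.sublist hsub hge
    have h2 : List.Pairwise (fun a b : Int × String => a ≠ b) R := hndR
    exact (h1.and h2).imp (fun {a b} h =>
      lt_of_le_of_ne h.1 (fun he => h.2 (toLex.injective he).symm))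
  have hperm : R.Perm (PySem.Set.ofList M) := by
    apply List.perm_of_nodup_nodup_toFinset_eq hndR (PySem.Set.nodup_ofList M)
    ext x
    simp [hR, PySem.Set.mem_ofList, hS, PySem.List.mem_sorted]
  exact (PySem.List.sorted_rev_eq_of_perm_of_pairwise_gt _ _ _ hperm hgt).symm

theorem pvL_swap (urls : List String) :
    ∀ p ∈ (pvL urls).map pvSwap, pvScore p.2 = some p.1 := by
  intro p hp
  obtain ⟨kv, hkv, rfl⟩ := List.mem_map.1 hp
  simpa [pvSwap] using pvL_sound hkv

-- ===== B-side: the bucket construction =====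

def pvBucket (c : Int) (urls : List String) : List String :=
  PySem.Set.ofList (urls.filter (fun u => pvScore u == some c))

def pvBlock (c : Int) (urls : List String) : List (Int × String) :=
  (PySem.List.sorted (pvBucket c urls) (fun x => x) true).map (fun u => (c, u))

-- B's fold builds the three buckets
theorem pvB_fold (urls : List String) :
    ∀ (st : List String × List String × List String),
    urls.foldl (fun (st : List String × List String × List String) u =>
      let low := PySem.Str.lower u
      if pvAvoid.any (fun av => PySem.Str.isIn av low) then st
      else
        let pref := pvPreferred.any (fun frag => PySem.Str.isIn frag low)
        let path := pvPathFrags.any (fun x => PySem.Str.isIn x low)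
        if pref && path then (PySem.Set.add st.1 u, st.2.1, st.2.2)
        else if pref then (st.1, PySem.Set.add st.2.1 u, st.2.2)
        else if path then (st.1, st.2.1, PySem.Set.add st.2.2 u)
        else st) st
    = (PySem.Set.update st.1 (urls.filter (fun u => pvScore u == some 185)),
       PySem.Set.update st.2.1 (urls.filter (fun u => pvScore u == some 150)),
       PySem.Set.update st.2.2 (urls.filter (fun u => pvScore u == some 70))) := by
  induction urls with
  | nil => intro st; simp [PySem.Set.update]
  | cons u urls ih =>
      intro st
      rw [List.foldl_cons, List.filter_cons, List.filter_cons, List.filter_cons]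
      have hsc := pvScore_eq u
      by_cases ha : pvAvoided u
      · have ha' : (pvAvoid.any fun av => PySem.Str.isIn av (PySem.Str.lower u)) = true := ha
        have hv : pvScore u = none := by rw [hsc, if_pos ha]
        simp only [ha', if_true]
        rw [ih st]
        simp [hv]
      · have ha' : (pvAvoid.any fun av => PySem.Str.isIn av (PySem.Str.lower u)) = false := by
          simpa [pvAvoided] using ha
        by_cases hp : pvPref u <;> by_cases hq : pvPath u
        · have hp' : (pvPreferred.any fun frag => PySem.Str.isIn frag (PySem.Str.lower u)) = true := hp
          have hq' : (pvPathFrags.any fun x => PySem.Str.isIn x (PySem.Str.lower u)) = true := hq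
          have hv : pvScore u = some 185 := by rw [hsc, if_neg ha, if_pos hp, if_pos hq]
          simp only [ha', hp', hq', Bool.false_eq_true, if_false, Bool.and_self, if_true]
          rw [ih]
          simp [hv, PySem.Set.update]
        · have hp' : (pvPreferred.any fun frag => PySem.Str.isIn frag (PySem.Str.lower u)) = true := hp
          have hq' : (pvPathFrags.any fun x => PySem.Str.isIn x (PySem.Str.lower u)) = false := by
            simpa [pvPath] using hq
          have hv : pvScore u = some 150 := by rw [hsc, if_neg ha, if_pos hp, if_neg (by simp [hq])]
          simp only [ha', hp', hq', Bool.false_eq_true, if_false, Bool.and_false, if_true]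
          rw [ih]
          simp [hv, PySem.Set.update]
        · have hp' : (pvPreferred.any fun frag => PySem.Str.isIn frag (PySem.Str.lower u)) = false := by
            simpa [pvPref] using hp
          have hq' : (pvPathFrags.any fun x => PySem.Str.isIn x (PySem.Str.lower u)) = true := hq
          have hv : pvScore u = some 70 := by rw [hsc, if_neg ha, if_neg (by simp [hp]), if_pos hq]
          simp only [ha', hp', hq', Bool.false_eq_true, if_false, Bool.false_and, if_true]
          rw [ih]
          simp [hv, PySem.Set.update]
        · have hp' : (pvPreferred.any fun frag => PySem.Str.isIn frag (PySem.Str.lower u)) = false := by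
            simpa [pvPref] using hp
          have hq' : (pvPathFrags.any fun x => PySem.Str.isIn x (PySem.Str.lower u)) = false := by
            simpa [pvPath] using hq
          have hv : pvScore u = none := by
            rw [hsc, if_neg ha, if_neg (by simp [hp]), if_neg (by simp [hq])]
          simp only [ha', hp', hq', Bool.false_eq_true, if_false, Bool.false_and]
          rw [ih st]
          simp [hv]

-- every pair in a block has first component c
theorem pvBlock_fst (c : Int) (urls : List String) :
    ∀ x ∈ pvBlock c urls, x.1 = c := by
  intro x hx
  obtain ⟨u, _, rfl⟩ := List.mem_map.1 hx
  rfl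

-- a block is strictly descending in toLex
theorem pvBlock_pairwise (c : Int) (urls : List String) :
    (pvBlock c urls).Pairwise (fun a b : Int × String => (toLex b : Int ×ₗ String) < toLex a) := by
  have hnd : (PySem.List.sorted (pvBucket c urls) (fun x => x) true).Nodup :=
    ((PySem.List.sorted_perm (pvBucket c urls) (fun x => x) true).nodup_iff).2
      (PySem.Set.nodup_ofList _)
  have hge : (PySem.List.sorted (pvBucket c urls) (fun x => x) true).Pairwise
      (fun a b : String => b ≤ a) :=
    PySem.List.sorted_pairwise_rev (pvBucket c urls) (fun x => x)
  have hgt : (PySem.List.sorted (pvBucket c urls) (fun x => x) true).Pairwise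
      (fun a b : String => b < a) :=
    ((hge.and hnd).imp (fun {a b} h => lt_of_le_of_ne h.1 (fun he => h.2 he.symm)))
  rw [pvBlock, List.pairwise_map]
  exact hgt.imp (fun {a b} h => by
    simp [Prod.Lex.toLex_lt_toLex]
    simpa using h)

-- membership in a block
theorem pvBlock_mem (c : Int) (urls : List String) (x : Int × String) :
    x ∈ pvBlock c urls ↔ x.1 = c ∧ x.2 ∈ urls ∧ pvScore x.2 = some c := by
  obtain ⟨s, u⟩ := x
  simp only [pvBlock, pvBucket, List.mem_map, PySem.List.mem_sorted, PySem.Set.mem_ofList,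
    List.mem_filter, beq_iff_eq, Prod.mk.injEq]
  constructor
  · rintro ⟨v, ⟨hv, hs⟩, rfl, rfl⟩
    exact ⟨rfl, hv, hs⟩
  · rintro ⟨rfl, hu, hs⟩
    exact ⟨u, ⟨hu, hs⟩, by simp⟩

-- B's output list (before take 12)
def pvLL (urls : List String) : List (Int × String) :=
  pvBlock 185 urls ++ pvBlock 150 urls ++ pvBlock 70 urls

theorem pvLL_pairwise (urls : List String) :
    (pvLL urls).Pairwise (fun a b : Int × String => (toLex b : Int ×ₗ String) < toLex a) := by
  have step : ∀ (c c' : Int), c' < c → ∀ a ∈ pvBlock c urls, ∀ b ∈ pvBlock c' urls,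
      (toLex b : Int ×ₗ String) < toLex a := by
    intro c c' hcc a ha b hb
    simp only [Prod.Lex.toLex_lt_toLex]
    exact Or.inl (by rw [pvBlock_fst c urls a ha, pvBlock_fst c' urls b hb]; exact hcc)
  rw [pvLL, List.append_assoc, List.pairwise_append]
  refine ⟨pvBlock_pairwise _ _, ?_, ?_⟩
  · rw [List.pairwise_append]
    refine ⟨pvBlock_pairwise _ _, pvBlock_pairwise _ _, step 150 70 (by norm_num)⟩
  · intro a ha b hb
    rcases List.mem_append.1 hb with h | h
    · exact step 185 150 (by norm_num) a ha b h
    · exact step 185 70 (by norm_num) a ha b h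

theorem pvLL_nodup (urls : List String) : (pvLL urls).Nodup :=
  (pvLL_pairwise urls).imp (fun {a b} h => fun he => by subst he; exact lt_irrefl _ h)

theorem pvScore_values (u : String) (s : Int) (h : pvScore u = some s) :
    s = 185 ∨ s = 150 ∨ s = 70 := by
  rw [pvScore_eq] at h
  split_ifs at h <;> simp_all

theorem pvLL_mem (urls : List String) (x : Int × String) :
    x ∈ pvLL urls ↔ x.2 ∈ urls ∧ pvScore x.2 = some x.1 := by
  simp only [pvLL, List.mem_append, pvBlock_mem]
  constructor
  · rintro ((⟨h1, h2, h3⟩ | ⟨h1, h2, h3⟩) | ⟨h1, h2, h3⟩) <;> exact ⟨h2, h1 ▸ h3⟩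
  · rintro ⟨hu, hs⟩
    rcases pvScore_values x.2 x.1 hs with h | h | h
    · exact Or.inl (Or.inl ⟨h, hu, h ▸ hs⟩)
    · exact Or.inl (Or.inr ⟨h, hu, h ▸ hs⟩)
    · exact Or.inr ⟨h, hu, h ▸ hs⟩

-- B's list is the sorted dedup of A's scored list
theorem pvLL_eq_sorted (urls : List String) :
    PySem.List.sorted (PySem.Set.ofList ((pvL urls).map pvSwap)) (fun p => toLex p) true
      = pvLL urls := by
  have hperm : (pvLL urls).Perm (PySem.Set.ofList ((pvL urls).map pvSwap)) := by
    apply List.perm_of_nodup_nodup_toFinset_eq (pvLL_nodup urls) (PySem.Set.nodup_ofList _)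
    ext x
    simp only [List.mem_toFinset, PySem.Set.mem_ofList, pvLL_mem, List.mem_map, pvL,
      List.mem_filterMap, Option.map_eq_some_iff]
    constructor
    · rintro ⟨hu, hs⟩
      exact ⟨(x.2, x.1), ⟨x.2, hu, x.1, hs, rfl⟩, rfl⟩
    · rintro ⟨kv, ⟨u, hu, s, hs, rfl⟩, rfl⟩
      exact ⟨hu, hs⟩
  exact PySem.List.sorted_rev_eq_of_perm_of_pairwise_gt _ _ _ hperm (pvLL_pairwise urls)

-- ===== VERDICT =====
theorem score_url_candidates_py_spec : Claim_equal_score_url_candidates_py := by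
  unfold Claim_equal_score_url_candidates_py
  intro urls _
  show score_url_candidates_py urls = score_url_candidates_py_alt urls
  unfold score_url_candidates_py score_url_candidates_py_alt
  rw [pvA_fold urls [], pvB_fold urls ([], [], [])]
  simp only [List.nil_append]
  -- A side: dedup after sort
  have hS : ∀ p ∈ PySem.List.sorted ((pvL urls).map pvSwap) (fun p => toLex p) true,
      pvScore p.2 = some p.1 := by
    intro p hp
    exact pvL_swap urls p ((PySem.List.mem_sorted _ _ _ _).1 hp)
  have hd := pv_dedup_fold (PySem.List.sorted ((pvL urls).map pvSwap) (fun p => toLex p) true)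
      [] hS (by simp)
  simp only [List.map_nil] at hd
  rw [hd]
  have hupd : PySem.Set.update ([] : List (Int × String))
      (PySem.List.sorted ((pvL urls).map pvSwap) (fun p => toLex p) true)
      = PySem.Set.ofList (PySem.List.sorted ((pvL urls).map pvSwap) (fun p => toLex p) true) := rfl
  rw [hupd, pv_central ((pvL urls).map pvSwap), pvLL_eq_sorted urls]
  rfl
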